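-- pv_equiv track=rewrite | github.com/ManonMars12/L3-INFO | atelier_2_ex_3.py | separer
-- ===== SOURCE A (Python) =====
-- def separer(L:list)->list:
--     LSEP=[]
--     cpt=0
--     for i in range(len(L)):
--         if L[i]<0 :
--             LSEP.insert(0, L[i])
--             cpt=cpt+1
--         elif L[i]>0 :
--             LSEP.append(L[i])
--         else :
--             LSEP.insert(cpt, 0)
--
--     return(LSEP)
-- ===== SOURCE B (Python) =====
-- def separer(L: list) -> list:
--     neg = []
--     pos = []
--     z = 0
--     for x in L:
--         if x < 0:
--             neg.append(x)
--         elif x > 0: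
--             pos.append(x)
--         else:
--             z += 1
--     return neg[::-1] + [0] * z + pos
-- ===== Notes on version B (the rewrite author's own statement) =====
-- stated objective: faster
-- what changed: Replaces A's repeated list.insert at the front/middle of the growing result (O(n) shifting per element) with a single pass that appends into three buckets (negatives, zero count, positives) and concatenates reversed-negatives ++ zeros ++ positives once.
import Mathlib
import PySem

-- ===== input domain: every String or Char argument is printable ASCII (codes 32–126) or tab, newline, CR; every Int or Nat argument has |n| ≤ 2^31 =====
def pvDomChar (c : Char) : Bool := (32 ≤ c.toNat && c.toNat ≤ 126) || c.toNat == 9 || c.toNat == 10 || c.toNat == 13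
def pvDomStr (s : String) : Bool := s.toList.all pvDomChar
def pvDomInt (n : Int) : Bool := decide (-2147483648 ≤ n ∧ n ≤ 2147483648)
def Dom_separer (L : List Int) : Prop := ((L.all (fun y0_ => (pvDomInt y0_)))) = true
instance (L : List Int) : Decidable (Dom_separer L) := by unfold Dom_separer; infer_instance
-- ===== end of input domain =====

-- B: one pass into three buckets (negatives, zero count, positives) concatenated once, instead of A's repeated insert into the growing result.


-- ===== PORT A =====
def separer (L : List Int) : List Int :=
  -- for i in range(len(L)): … L[i] …  with state (LSEP, cpt)
  (((PySem.List.pyRange 0 (PySem.List.len L) 1).foldl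
      (fun (acc : List Int × Int) i =>
        if PySem.List.pyGetD L i 0 < 0 then (PySem.List.insert acc.1 0 (PySem.List.pyGetD L i 0), acc.2 + 1)
        else if PySem.List.pyGetD L i 0 > 0 then (acc.1 ++ [PySem.List.pyGetD L i 0], acc.2)
        else (PySem.List.insert acc.1 acc.2 0, acc.2))
      ([], 0)) : List Int × Int).1

-- ===== PORT B =====
def separer_alt (L : List Int) : List Int :=
  let r := L.foldl
    (fun (acc : List Int × Int × List Int) x =>
      if x < 0 then (acc.1 ++ [x], acc.2.1, acc.2.2)
      else if x > 0 then (acc.1, acc.2.1, acc.2.2 ++ [x])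
      else (acc.1, acc.2.1 + 1, acc.2.2))
    ([], 0, [])
  r.1.reverse ++ List.replicate r.2.1.toNat 0 ++ r.2.2

-- ===== PRECONDITION & SPEC =====
def Spec_separer (L : List Int) (out : List Int) : Prop := out = separer_alt L
instance (L : List Int) (out : List Int) : Decidable (Spec_separer L out) := by unfold Spec_separer; infer_instance

-- ===== CLAIM (what is proved, stated in full; the proofs are below) =====
def Claim_equal_separer : Prop := ∀ (L : List Int), Dom_separer L → Spec_separer L (separer L)

-- ===== LEMMAS AND PROOFS =====

-- Loop invariant: A's state is (neg.reverse ++ zeros ++ pos, neg.length) where (neg, z, pos) is B's state.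
lemma sep_loop (L : List Int) : ∀ (neg pos : List Int) (z : ℕ),
    L.foldl
      (fun (acc : List Int × Int) x =>
        if x < 0 then (PySem.List.insert acc.1 0 x, acc.2 + 1)
        else if x > 0 then (acc.1 ++ [x], acc.2)
        else (PySem.List.insert acc.1 acc.2 0, acc.2))
      (neg.reverse ++ List.replicate z 0 ++ pos, (neg.length : Int))
    = (let r := L.foldl
        (fun (acc : List Int × Int × List Int) x =>
          if x < 0 then (acc.1 ++ [x], acc.2.1, acc.2.2)
          else if x > 0 then (acc.1, acc.2.1, acc.2.2 ++ [x])
          else (acc.1, acc.2.1 + 1, acc.2.2))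
        (neg, (z : Int), pos);
       (r.1.reverse ++ List.replicate r.2.1.toNat 0 ++ r.2.2, (r.1.length : Int))) := by
  induction L with
  | nil => intro neg pos z; simp
  | cons x L ih =>
    intro neg pos z
    by_cases hneg : x < 0
    · simp only [List.foldl_cons, if_pos hneg]
      have h1 : PySem.List.insert (neg.reverse ++ List.replicate z 0 ++ pos) 0 x
          = (neg ++ [x]).reverse ++ List.replicate z 0 ++ pos := by
        simp [PySem.List.insert_zero]
      have h2 : (neg.length : Int) + 1 = ((neg ++ [x]).length : Int) := by
        simp
      rw [h1, h2]
      exact ih (neg ++ [x]) pos z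
    · by_cases hpos : x > 0
      · simp only [List.foldl_cons, if_neg hneg, if_pos hpos]
        have h1 : (neg.reverse ++ List.replicate z 0 ++ pos) ++ [x]
            = neg.reverse ++ List.replicate z 0 ++ (pos ++ [x]) := by
          simp
        rw [h1]
        exact ih neg (pos ++ [x]) z
      · simp only [List.foldl_cons, if_neg hneg, if_neg hpos]
        have h1 : PySem.List.insert (neg.reverse ++ List.replicate z 0 ++ pos) (neg.length : Int) 0
            = neg.reverse ++ List.replicate (z + 1) 0 ++ pos := by
          rw [show (neg.length : Int) = (neg.reverse.length : Int) by simp,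
              List.append_assoc,
              PySem.List.insert_natCast _ _ _ (by simp),
              List.take_left, List.drop_left]
          simp [List.replicate_succ]
        have h2 : (z : Int) + 1 = ((z + 1 : ℕ) : Int) := by push_cast; ring
        rw [h1, h2]
        exact ih neg pos (z + 1)

-- ===== VERDICT (by name: the statement is the Claim_ definition above) =====
theorem separer_spec : Claim_equal_separer := by
  intro L _
  unfold Spec_separer separer separer_alt
  rw [PySem.List.foldl_pyRange_zero_pyGetD L 0
      (fun (acc : List Int × Int) x =>
        if x < 0 then (PySem.List.insert acc.1 0 x, acc.2 + 1)
        else if x > 0 then (acc.1 ++ [x], acc.2)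
        else (PySem.List.insert acc.1 acc.2 0, acc.2)) ([], 0)]
  have := sep_loop L [] [] 0
  simp only [List.reverse_nil, List.replicate_zero, List.nil_append, List.length_nil,
    Nat.cast_zero] at this
  rw [this]
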